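-- pv_equiv track=rewrite | github.com/kmcos/kmcos | kmcos/interactions/configurationsAndInteractions.py | getSiteOccupationPossibilities
-- ===== SOURCE A (Python) =====
-- import itertools
--
-- def getSiteOccupationPossibilities (set_of_sites, PossibleSpecies):
--     #Use itertools to find all possible products (i.e., permutations) of the possible adsorbates, for the number of equivalent sites.
--     #the "repeat" argument is the number of bins, or in this case, sites.
--     if type(set_of_sites) != list:
--         raise Exception("set_of_sites must be a list of strings")
--     set_of_sites_occupations_possibilities = list((itertools.product(PossibleSpecies,repeat=len(set_of_sites))))
--     #Now, we need to make lists and append them into a larger list. If there are 6 sites, we make little lists of 6 for the possible species and append them, but as pairs.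
--     siteOccupationPossibilities = []
--     for possibileSpeciesCombination in set_of_sites_occupations_possibilities:
--         #print possibileSpeciesCombination
-- #below I create each of the site and species pairs for each possibileSpeciesCombination
--         currentSpeciesCombinationWithSites = []
--         for index, occupation_identity in enumerate(possibileSpeciesCombination):
--             currentSpeciesCombinationWithSitePair = (set_of_sites[index],occupation_identity)
--             currentSpeciesCombinationWithSites.append(currentSpeciesCombinationWithSitePair)
--             #print currentSpeciesCombinationWithSites
--             #print set_of_sites[index],occupation_identity
--         siteOccupationPossibilities.append(currentSpeciesCombinationWithSites)
--     #Below block is for testing purposes.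
-- #    for possibility in siteOccupationPossibilities:
-- #        print possibility
-- #        for pair in possibility:
-- #           print pair
--     return siteOccupationPossibilities #This object has the structure possibilities > pairs of site and species [and within each pair, one site one species]
-- ===== SOURCE B (Python) =====
-- def getSiteOccupationPossibilities(set_of_sites, PossibleSpecies):
--     if type(set_of_sites) != list:
--         raise Exception("set_of_sites must be a list of strings")
--     species = list(PossibleSpecies)
--     m = len(species)
--     siteOccupationPossibilities = []
--     # enumerate combinations by index arithmetic: the k-th combination is the
--     # base-m representation of k, most significant digit = first site
--     for idx in range(m ** len(set_of_sites)):
--         row = []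
--         rem = idx
--         for site in reversed(set_of_sites):
--             row.append((site, species[rem % m]))
--             rem //= m
--         row.reverse()
--         siteOccupationPossibilities.append(row)
--     return siteOccupationPossibilities
-- ===== Notes on version B (the rewrite author's own statement) =====
-- stated objective: alternative
-- what changed: Replaces the materialised itertools.product and the second enumerate-pairing pass by direct index arithmetic: combination k is obtained by decoding k in base len(PossibleSpecies) with % and //, pairing each digit with its site in one loop.
import Mathlib
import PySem

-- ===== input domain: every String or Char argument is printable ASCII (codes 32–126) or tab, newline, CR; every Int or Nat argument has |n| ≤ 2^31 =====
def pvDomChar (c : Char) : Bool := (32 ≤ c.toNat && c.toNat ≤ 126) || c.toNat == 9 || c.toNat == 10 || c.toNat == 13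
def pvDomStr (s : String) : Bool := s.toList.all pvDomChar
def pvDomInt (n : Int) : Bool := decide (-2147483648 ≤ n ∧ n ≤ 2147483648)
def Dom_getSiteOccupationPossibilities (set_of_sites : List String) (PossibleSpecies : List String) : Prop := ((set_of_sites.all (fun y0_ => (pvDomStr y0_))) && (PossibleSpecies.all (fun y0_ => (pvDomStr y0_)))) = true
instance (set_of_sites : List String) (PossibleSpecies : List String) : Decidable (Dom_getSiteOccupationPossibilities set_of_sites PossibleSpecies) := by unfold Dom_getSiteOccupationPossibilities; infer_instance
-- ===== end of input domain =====

-- B replaces the materialised itertools.product and the second enumerate-pairing pass by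
-- direct index arithmetic: the k-th combination is the base-|species| representation of k,
-- decoded with % and // (objective: alternative; same output, same order).
-- A's list-type check cannot fail under the Lean type convention, so both ports are total.

-- ===== PORT A =====
-- itertools.product(PossibleSpecies, repeat=n): fold n times, extending each tuple by each species
def pvProductRepeat (species : List String) (n : Nat) : List (List String) :=
  (List.range n).foldl
    (fun acc _ => acc.flatMap (fun t => species.map (fun s => t ++ [s]))) [[]]

def getSiteOccupationPossibilities (set_of_sites : List String) (PossibleSpecies : List String) : List (List (String × String)) :=
  let set_of_sites_occupations_possibilities := pvProductRepeat PossibleSpecies set_of_sites.length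
  set_of_sites_occupations_possibilities.foldl
    (fun siteOccupationPossibilities possibileSpeciesCombination =>
      siteOccupationPossibilities ++
        [(PySem.List.enumerate possibileSpeciesCombination 0).foldl
          (fun cur p => cur ++ [(PySem.List.pyGetD set_of_sites p.1 "", p.2)]) []])
    []

-- ===== PORT B =====
-- inner loop of Source B: 'for site in reversed(set_of_sites): row.append((site, species[rem % m])); rem //= m'
-- Python's % and // on the nonnegative rem and m agree with Nat's % and /; species[rem % m] is
-- in range whenever the loop runs (then m ≥ 1), ported as getD.
def pvBRow (species : List String) (m : Nat) (rev_sites : List String) (idx : Nat) :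
    List (String × String) × Nat :=
  rev_sites.foldl
    (fun st site => (st.1 ++ [(site, species.getD (st.2 % m) "")], st.2 / m)) ([], idx)

def getSiteOccupationPossibilities_alt (set_of_sites : List String) (PossibleSpecies : List String) : List (List (String × String)) :=
  let m := PossibleSpecies.length
  (List.range (m ^ set_of_sites.length)).foldl
    (fun siteOccupationPossibilities idx =>
      siteOccupationPossibilities ++
        [(pvBRow PossibleSpecies m set_of_sites.reverse idx).1.reverse]) []

-- ===== PRECONDITION & SPEC =====
def Spec_getSiteOccupationPossibilities (set_of_sites : List String) (PossibleSpecies : List String) (out : List (List (String × String))) : Prop := out = getSiteOccupationPossibilities_alt set_of_sites PossibleSpecies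
instance (set_of_sites : List String) (PossibleSpecies : List String) (out : List (List (String × String))) : Decidable (Spec_getSiteOccupationPossibilities set_of_sites PossibleSpecies out) := by unfold Spec_getSiteOccupationPossibilities; infer_instance

-- ===== CLAIM (what is proved, stated in full; the proofs are below) =====
def Claim_equal_getSiteOccupationPossibilities : Prop := ∀ (set_of_sites : List String) (PossibleSpecies : List String), Dom_getSiteOccupationPossibilities set_of_sites PossibleSpecies → Spec_getSiteOccupationPossibilities set_of_sites PossibleSpecies (getSiteOccupationPossibilities set_of_sites PossibleSpecies)

-- ===== LEMMAS AND PROOFS =====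

-- base-m decoding of idx into n digits (most significant first), as species values
def pvDecode (species : List String) (m : Nat) : Nat → Nat → List String
  | 0, _ => []
  | n+1, idx => pvDecode species m n (idx / m) ++ [species.getD (idx % m) ""]

-- A's pairing pass on one species combination, written as a map
def pvPairFn (sites : List String) (t : List String) : List (String × String) :=
  (PySem.List.enumerate t 0).map (fun p => (PySem.List.pyGetD sites p.1 "", p.2))

theorem pvProductRepeat_succ (species : List String) (n : Nat) :
    pvProductRepeat species (n + 1) =
      (pvProductRepeat species n).flatMap (fun t => species.map (fun s => t ++ [s])) := by
  simp [pvProductRepeat, List.range_succ]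

theorem pvDecode_length (species : List String) (m : Nat) (n : Nat) :
    ∀ idx, (pvDecode species m n idx).length = n := by
  induction n with
  | zero => intro idx; simp [pvDecode]
  | succ n ih => intro idx; simp [pvDecode, ih]

theorem pvRange_mul (k m : Nat) :
    List.range (k * m) =
      (List.range k).flatMap (fun q => (List.range m).map (fun r => q * m + r)) := by
  induction k with
  | zero => simp
  | succ k ih =>
    have : (k + 1) * m = k * m + m := by ring
    rw [this, List.range_add, ih, List.range_succ]
    simp

theorem pvMap_index {β : Type} (species : List String) (f : String → β) :
    species.map f = (List.range species.length).map (fun r => f (species.getD r "")) := by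
  apply List.ext_getElem
  · simp
  · intro i h1 h2
    simp at h1 h2
    simp [List.getD, h2]

theorem pvDecode_mul_add (species : List String) (m n q r : Nat) (hr : r < m) :
    pvDecode species m (n + 1) (q * m + r) =
      pvDecode species m n q ++ [species.getD r ""] := by
  have hm : 0 < m := by omega
  have h1 : (q * m + r) / m = q := by
    rw [mul_comm, Nat.mul_add_div hm, Nat.div_eq_of_lt hr]
    ring
  have h2 : (q * m + r) % m = r := by
    rw [mul_comm, Nat.mul_add_mod, Nat.mod_eq_of_lt hr]
  simp [pvDecode, h1, h2]

-- L1: the materialised product is the range mapped through base-m decoding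
theorem pvProduct_eq_decode (species : List String) (n : Nat) :
    pvProductRepeat species n =
      (List.range (species.length ^ n)).map (pvDecode species species.length n) := by
  induction n with
  | zero => simp [pvProductRepeat, pvDecode]
  | succ n ih =>
    rw [pvProductRepeat_succ, ih, pow_succ, pvRange_mul, List.map_flatMap, List.flatMap_map]
    apply List.flatMap_congr
    intro q _
    rw [List.map_map]
    rw [pvMap_index species (fun s => pvDecode species species.length n q ++ [s])]
    apply List.map_congr_left
    intro r hr
    simp only [Function.comp]
    rw [pvDecode_mul_add species species.length n q r (List.mem_range.mp hr)]

theorem pvBRow_acc (species : List String) (m : Nat) :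
    ∀ (l : List String) (acc : List (String × String)) (r : Nat),
      l.foldl (fun st site => (st.1 ++ [(site, species.getD (st.2 % m) "")], st.2 / m)) (acc, r) =
        (acc ++ (pvBRow species m l r).1, (pvBRow species m l r).2) := by
  intro l
  induction l with
  | nil => intro acc r; simp [pvBRow]
  | cons x l ih =>
    intro acc r
    simp only [pvBRow, List.foldl_cons, List.nil_append]
    rw [ih (acc ++ [(x, species.getD (r % m) "")]) (r / m),
        ih [(x, species.getD (r % m) "")] (r / m)]
    simp [pvBRow]

theorem pvPairFn_prefix (sites : List String) (x : String) :
    ∀ (t : List String) (k : Nat), k + t.length ≤ sites.length →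
      (PySem.List.enumerate t (k : Int)).map (fun p => (PySem.List.pyGetD (sites ++ [x]) p.1 "", p.2)) =
      (PySem.List.enumerate t (k : Int)).map (fun p => (PySem.List.pyGetD sites p.1 "", p.2)) := by
  intro t
  induction t with
  | nil => simp [PySem.List.enumerate_nil]
  | cons a t ih =>
    intro k hk
    simp only [PySem.List.enumerate_cons, List.map_cons]
    have hk' : k < sites.length := by simp at hk; omega
    have h1 : PySem.List.pyGetD (sites ++ [x]) (k : Int) "" = PySem.List.pyGetD sites (k : Int) "" := by
      simp [PySem.List.pyGetD_natCast, List.getD, List.getElem?_append_left hk']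
    have h2 := ih (k + 1) (by simp at hk ⊢; omega)
    rw [h1]
    have hc : ((k : Int)) + 1 = ((k + 1 : Nat) : Int) := by push_cast; ring
    rw [hc, h2]

theorem pvPairFn_concat (sites : List String) (t : List String) (x s : String)
    (hlen : t.length = sites.length) :
    pvPairFn (sites ++ [x]) (t ++ [s]) = pvPairFn sites t ++ [(x, s)] := by
  unfold pvPairFn
  rw [PySem.List.enumerate_append, List.map_append]
  congr 1
  · simpa using pvPairFn_prefix sites x t 0 (by omega)
  · simp [PySem.List.enumerate_cons, PySem.List.enumerate_nil, hlen,
      PySem.List.pyGetD_natCast, List.getD]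


-- B's inner loop equals A's pairing of the decoded combination
theorem pvRow_eq (species : List String) :
    ∀ (sites : List String) (idx : Nat),
      (pvBRow species species.length sites.reverse idx).1.reverse =
        pvPairFn sites (pvDecode species species.length sites.length idx) := by
  intro sites
  induction sites using List.reverseRecOn with
  | nil => intro idx; simp [pvBRow, pvPairFn, pvDecode, PySem.List.enumerate_nil]
  | append_singleton sites x ih =>
    intro idx
    have step : pvBRow species species.length ((sites ++ [x]).reverse) idx =
        ([(x, species.getD (idx % species.length) "")] ++
           (pvBRow species species.length sites.reverse (idx / species.length)).1,
         (pvBRow species species.length sites.reverse (idx / species.length)).2) := by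
      simp only [List.reverse_append, List.reverse_cons, List.reverse_nil,
        List.singleton_append, pvBRow, List.foldl_cons, List.nil_append]
      exact pvBRow_acc species species.length sites.reverse
        [(x, species.getD (idx % species.length) "")] (idx / species.length)
    rw [step]
    have hL : ([(x, species.getD (idx % species.length) "")] ++
        (pvBRow species species.length sites.reverse (idx / species.length)).1).reverse =
        (pvBRow species species.length sites.reverse (idx / species.length)).1.reverse ++
        [(x, species.getD (idx % species.length) "")] := by simp
    have hn : (sites ++ [x]).length = sites.length + 1 := by simp
    rw [hL, ih (idx / species.length), hn]
    have hd : pvDecode species species.length (sites.length + 1) idx =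
        pvDecode species species.length sites.length (idx / species.length) ++
          [species.getD (idx % species.length) ""] := by
      simp [pvDecode]
    rw [hd]
    exact (pvPairFn_concat sites _ x _ (pvDecode_length species species.length sites.length _)).symm

-- ===== VERDICT (by name: the statement is the Claim_ definition above) =====
theorem getSiteOccupationPossibilities_spec : Claim_equal_getSiteOccupationPossibilities := by
  intro sites species _
  unfold Spec_getSiteOccupationPossibilities
  show getSiteOccupationPossibilities sites species = _
  unfold getSiteOccupationPossibilities getSiteOccupationPossibilities_alt
  rw [PySem.List.foldl_append_singleton_eq_map, PySem.List.foldl_append_singleton_eq_map]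
  have hA : ∀ t : List String,
      (PySem.List.enumerate t 0).foldl
        (fun cur p => cur ++ [(PySem.List.pyGetD sites p.1 "", p.2)]) [] = pvPairFn sites t := by
    intro t
    rw [PySem.List.foldl_append_singleton_eq_map]
    rfl
  simp only [hA, List.nil_append]
  rw [pvProduct_eq_decode, List.map_map]
  apply List.map_congr_left
  intro idx _
  exact (pvRow_eq species sites idx).symm
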